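-- pv_equiv track=rewrite | github.com/afzalsiddique/problem-solving | Problem_Solving_Python/leetcode/lc944.py | minDeletionSize
-- ===== SOURCE A (Python) =====
-- import itertools; import math; import operator; import random; import string; from bisect import *; from collections import deque, defaultdict, Counter, OrderedDict; from functools import reduce; from heapq import *; import unittest; from typing import List, Optional; import functools
--
-- def minDeletionSize(strs: List[str]) -> int:
--     m,n=len(strs),len(strs[0])
--     res=0
--     for j in range(n):
--         flag=False
--         for i in range(1,m):
--             if strs[i][j]<strs[i-1][j]:
--                 flag=True
--                 break
--         if flag:
--             res+=1
--     return res
-- ===== SOURCE B (Python) =====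
-- def minDeletionSize(strs):
--     return sum(tuple(sorted(col)) != col for col in zip(*strs))
-- ===== Notes on version B (the rewrite author's own statement) =====
-- stated objective: simpler
-- what changed: Replaces the explicit nested index loops (scan each column for the first adjacent inversion) by transposing with zip(*strs) and counting the columns that differ from their sorted copy.
-- outside the precondition, e.g. on minDeletionSize(['bb', 'ca', 'a']): A returns 2, B returns 1
import Mathlib
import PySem

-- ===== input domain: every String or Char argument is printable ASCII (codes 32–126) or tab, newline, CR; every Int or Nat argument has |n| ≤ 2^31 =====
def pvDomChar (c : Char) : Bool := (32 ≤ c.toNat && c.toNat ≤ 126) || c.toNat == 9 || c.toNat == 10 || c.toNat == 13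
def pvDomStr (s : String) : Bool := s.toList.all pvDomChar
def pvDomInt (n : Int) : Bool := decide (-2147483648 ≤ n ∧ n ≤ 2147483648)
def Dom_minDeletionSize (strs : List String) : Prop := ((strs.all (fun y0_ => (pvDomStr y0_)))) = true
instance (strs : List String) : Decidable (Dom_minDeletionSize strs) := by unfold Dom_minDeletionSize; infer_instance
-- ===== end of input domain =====

-- B replaces A's nested index loops by a transpose-then-sort-and-compare count of the unsorted columns (objective: simpler).

-- ===== PORT A =====
-- strs[i][j], with A's in-range indices resolved through PySem (defaults never reached under Pre_)
def pyCharAt (strs : List String) (i j : Int) : Char :=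
  (PySem.List.pyGet? ((PySem.List.pyGet? strs i).getD "").toList j).getD ' '

-- inner 'for i in range(1, m): if strs[i][j] < strs[i-1][j]: flag=True; break'
def minDelFlag (strs : List String) (j : Int) : List Int → Bool
  | [] => false
  | i :: rest =>
      if pyCharAt strs i j < pyCharAt strs (i - 1) j then true
      else minDelFlag strs j rest

def minDeletionSize (strs : List String) : Int :=
  let m : Int := PySem.List.len strs
  let n : Int := PySem.Str.len ((PySem.List.pyGet? strs 0).getD "")
  (PySem.List.pyRange 0 n 1).foldl
    (fun res j =>
      let flag := minDelFlag strs j (PySem.List.pyRange 1 m 1)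
      if flag then res + 1 else res) 0

-- ===== PORT B =====
-- zip(*xss): columns up to the shortest row
def zipCols (xss : List (List Char)) : List (List Char) :=
  match xss with
  | [] => []
  | x :: xs =>
      let k := xs.foldl (fun acc l => min acc l.length) x.length
      (List.range k).map (fun j => (x :: xs).map (fun l => l.getD j ' '))

def minDeletionSize_alt (strs : List String) : Int :=
  ((zipCols (strs.map String.toList)).map
    (fun col => if PySem.List.sorted col (fun c => c) false ≠ col then (1 : Int) else 0)).sum

-- ===== PRECONDITION & SPEC =====
-- Pre_ excludes the empty list (A raises IndexError on strs[0]) and lists containing a string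
-- shorter than strs[0] (A's column indexing then generally raises IndexError; any value A still
-- returns there depends on where its inner break fell, while B's zip silently truncates).
def Pre_minDeletionSize (strs : List String) : Prop :=
  strs ≠ [] ∧ ∀ s ∈ strs, (strs.headD "").toList.length ≤ s.toList.length
instance (strs : List String) : Decidable (Pre_minDeletionSize strs) := by
  unfold Pre_minDeletionSize; infer_instance

def pvWitness_minDeletionSize : List String := ["cba", "daf", "ghi"]

def Spec_minDeletionSize (strs : List String) (out : Int) : Prop := out = minDeletionSize_alt strs
instance (strs : List String) (out : Int) : Decidable (Spec_minDeletionSize strs out) := by unfold Spec_minDeletionSize; infer_instance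

-- ===== CLAIM (what is proved, stated in full; the proofs are below) =====
def Claim_equal_minDeletionSize : Prop := ∀ (strs : List String), Dom_minDeletionSize strs → Pre_minDeletionSize strs → Spec_minDeletionSize strs (minDeletionSize strs)

-- ===== LEMMAS AND PROOFS =====

theorem minDelFlag_eq_any (strs : List String) (j : Int) (is : List Int) :
    minDelFlag strs j is = is.any (fun i => pyCharAt strs i j < pyCharAt strs (i - 1) j) := by
  induction is with
  | nil => rfl
  | cons i rest ih =>
      simp only [minDelFlag, List.any_cons, ih]
      split <;> simp_all

-- the j-th column, as B's zipCols produces it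
def colAt (strs : List String) (j : Nat) : List Char :=
  strs.map (fun s => s.toList.getD j ' ')

theorem length_colAt (strs : List String) (j : Nat) :
    (colAt strs j).length = strs.length := by simp [colAt]

theorem pyCharAt_eq (strs : List String) (i j : Nat) (hi : i < strs.length) :
    pyCharAt strs (i : Int) (j : Nat) = (colAt strs j).getD i ' ' := by
  simp [pyCharAt, colAt, List.getElem?_eq_getElem hi, List.getD]

theorem getElem_mono_of_adj (col : List Char)
    (h : ∀ k, k + 1 < col.length → col.getD k ' ' ≤ col.getD (k + 1) ' ') :
    ∀ j, j < col.length → ∀ i, i ≤ j → col.getD i ' ' ≤ col.getD j ' ' := by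
  intro j
  induction j with
  | zero =>
      intro _ i hij
      have : i = 0 := Nat.le_zero.mp hij
      subst this; exact le_refl _
  | succ j ih =>
      intro hj i hij
      by_cases hi : i = j + 1
      · subst hi; exact le_refl _
      · exact le_trans (ih (by omega) i (by omega)) (h j hj)

theorem unsorted_iff_adj (col : List Char) :
    (¬ col.Pairwise (· ≤ ·))
      ↔ ∃ k, k + 1 < col.length ∧ col.getD (k + 1) ' ' < col.getD k ' ' := by
  constructor
  · intro h
    by_contra hno
    push Not at hno
    apply h
    rw [List.pairwise_iff_getElem]
    intro i j hi hj hij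
    have hadj : ∀ k, k + 1 < col.length → col.getD k ' ' ≤ col.getD (k + 1) ' ' :=
      fun k hk => hno k hk
    have := getElem_mono_of_adj col hadj j hj i (by omega)
    simpa [List.getD, List.getElem?_eq_getElem, hi, hj] using this
  · rintro ⟨k, hk, hlt⟩ hp
    rw [List.pairwise_iff_getElem] at hp
    have := hp k (k + 1) (by omega) hk (by omega)
    rw [List.getD, List.getD, List.getElem?_eq_getElem (by omega : k < col.length),
        List.getElem?_eq_getElem hk] at hlt
    simp at hlt
    exact absurd this (not_le_of_gt hlt)

theorem flag_iff_unsorted (strs : List String) (j : Nat) :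
    (minDelFlag strs (j : Int) (PySem.List.pyRange 1 (strs.length : Int) 1) = true)
      ↔ ¬ (colAt strs j).Pairwise (· ≤ ·) := by
  rw [minDelFlag_eq_any, unsorted_iff_adj, List.any_eq_true]
  simp only [PySem.List.mem_pyRange_one, length_colAt, decide_eq_true_eq]
  constructor
  · rintro ⟨i, ⟨h1, h2⟩, hlt⟩
    obtain ⟨k, hki⟩ : ∃ k : Nat, i = ((k + 1 : Nat) : Int) := ⟨i.toNat - 1, by omega⟩
    rw [hki] at hlt h2
    have hk2 : k + 1 < strs.length := by exact_mod_cast h2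
    have e2 : ((k + 1 : Nat) : Int) - 1 = ((k : Nat) : Int) := by push_cast; ring
    rw [e2, pyCharAt_eq strs (k + 1) j hk2, pyCharAt_eq strs k j (by omega)] at hlt
    exact ⟨k, hk2, hlt⟩
  · rintro ⟨k, hk, hlt⟩
    refine ⟨((k + 1 : Nat) : Int), ⟨by omega, by omega⟩, ?_⟩
    have e2 : ((k + 1 : Nat) : Int) - 1 = ((k : Nat) : Int) := by omega
    rw [pyCharAt_eq strs _ j hk, e2, pyCharAt_eq strs _ j (by omega)]
    exact hlt

theorem foldl_count (l : List Int) (p : Int → Bool) (acc : Int) :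
    l.foldl (fun res j => if p j then res + 1 else res) acc
      = acc + (l.map (fun j => if p j then (1 : Int) else 0)).sum := by
  induction l generalizing acc with
  | nil => simp
  | cons x t ih => simp only [List.foldl_cons, List.map_cons, List.sum_cons, ih]; split <;> ring

theorem foldl_min_of_le (a : Nat) (l : List (List Char)) (h : ∀ x ∈ l, a ≤ x.length) :
    l.foldl (fun acc x => min acc x.length) a = a := by
  induction l with
  | nil => rfl
  | cons x t ih =>
      simp only [List.foldl_cons]
      rw [min_eq_left (h x (by simp))]
      exact ih (fun y hy => h y (by simp [hy]))

theorem unsorted_iff_sorted_ne (col : List Char) :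
    (¬ col.Pairwise (· ≤ ·)) ↔ PySem.List.sorted col (fun c => c) false ≠ col := by
  constructor
  · intro h heq
    apply h
    have hp := PySem.List.sorted_pairwise col (fun c => c)
    rw [heq] at hp
    simpa using hp
  · intro h hp
    exact h (PySem.List.sorted_eq_self_of_pairwise col (fun c => c) (by simpa using hp))

-- ===== VERDICT (by name: the statement is the Claim_ definition above) =====
theorem minDeletionSize_spec : Claim_equal_minDeletionSize := by
  intro strs _ hpre
  obtain ⟨hne, hlen⟩ := hpre
  obtain ⟨s0, rest, rfl⟩ : ∃ s0 rest, strs = s0 :: rest := by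
    cases strs with
    | nil => exact absurd rfl hne
    | cons a t => exact ⟨a, t, rfl⟩
  unfold Spec_minDeletionSize minDeletionSize minDeletionSize_alt zipCols
  simp only [List.map_cons]
  have hmin : (rest.map String.toList).foldl (fun acc l => min acc l.length)
      s0.toList.length = s0.toList.length := by
    apply foldl_min_of_le
    intro x hx
    simp only [List.mem_map] at hx
    obtain ⟨s, hs, rfl⟩ := hx
    simpa using hlen s (by simp [hs])
  rw [hmin]
  have hn : PySem.Str.len s0 = (s0.toList.length : Int) := by
    simp [PySem.Str.len_eq]
  simp only [PySem.List.pyGet?_zero_cons, Option.getD_some, hn, PySem.List.len_eq]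
  have hfc := foldl_count (PySem.List.pyRange 0 (s0.toList.length : Int) 1)
    (fun j => minDelFlag (s0 :: rest) j
      (PySem.List.pyRange 1 (((s0 :: rest).length : Nat) : Int) 1)) 0
  refine hfc.trans ?_
  rw [zero_add, PySem.List.pyRange_one 0 (s0.toList.length : Int)]
  simp only [sub_zero, Int.toNat_natCast, List.map_map]
  refine congrArg List.sum ?_
  apply List.map_congr_left
  intro k hk
  simp only [Function.comp_apply, zero_add, List.mem_range] at *
  have hflag := flag_iff_unsorted (s0 :: rest) k
  have hcol : colAt (s0 :: rest) k
      = s0.toList.getD k ' ' :: rest.map ((fun l => l.getD k ' ') ∘ String.toList) := by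
    simp [colAt]
  rw [unsorted_iff_sorted_ne, hcol] at hflag
  by_cases hf : minDelFlag (s0 :: rest) (k : Int)
      (PySem.List.pyRange 1 (((s0 :: rest).length : Nat) : Int) 1) = true
  · rw [if_pos hf, if_pos (hflag.mp hf)]
  · rw [if_neg hf, if_neg (fun hs => hf (hflag.mpr hs))]
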